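-- pv_equiv track=rewrite | github.com/blldd/PythonExercise | leetcode1/982countTriplets.py | countTriplets_naive
-- ===== SOURCE A (Python) =====
-- def countTriplets_naive(A):
--     l = len(A)
--     cnt = 0
--     for i in range(l):
--         for j in range(l):
--             for k in range(l):
--                 if A[i] & A[j] & A[k] == 0:
--                     cnt += 1
--     return cnt
-- ===== SOURCE B (Python) =====
-- def countTriplets_naive(A):
--     # Count each pairwise AND value once, then test each distinct value
--     # against the third element instead of re-testing every (i, j) pair.
--     pair_count = {}
--     for x in A:
--         for y in A:
--             v = x & y
--             pair_count[v] = pair_count.get(v, 0) + 1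
--     total = 0
--     for v, c in pair_count.items():
--         for z in A:
--             if v & z == 0:
--                 total += c
--     return total
-- ===== Notes on version B (the rewrite author's own statement) =====
-- stated objective: faster
-- what changed: Instead of testing all n^3 index triples, B builds a hash counter of all pairwise AND values in one n^2 pass and then tests each DISTINCT pair-AND value against each element, adding the pair multiplicity; the n^3 scan over pairs collapses to a scan over distinct AND values.
import Mathlib
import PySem

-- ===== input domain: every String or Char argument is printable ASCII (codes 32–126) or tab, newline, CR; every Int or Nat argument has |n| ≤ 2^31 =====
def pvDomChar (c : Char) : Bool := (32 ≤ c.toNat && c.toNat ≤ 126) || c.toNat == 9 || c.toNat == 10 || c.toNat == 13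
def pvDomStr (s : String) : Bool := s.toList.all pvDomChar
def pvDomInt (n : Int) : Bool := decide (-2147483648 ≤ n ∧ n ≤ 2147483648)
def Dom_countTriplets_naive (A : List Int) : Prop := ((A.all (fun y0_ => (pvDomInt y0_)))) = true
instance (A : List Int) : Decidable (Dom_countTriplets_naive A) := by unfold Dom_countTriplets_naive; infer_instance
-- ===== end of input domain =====

-- B replaces A's triple index loop by a hash counter of all pairwise AND values
-- followed by a scan of the distinct AND values against each element (measurably
-- faster; worst-case asymptotic cost unchanged).

-- ===== PORT A =====
def countTriplets_naive (A : List Int) : Int :=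
  -- l = len(A); cnt = 0; triple nested `for … in range(l)`; `A[i] & A[j] & A[k] == 0`
  (PySem.List.pyRange 0 (A.length : Int) 1).foldl (fun cnt i =>
    (PySem.List.pyRange 0 (A.length : Int) 1).foldl (fun cnt j =>
      (PySem.List.pyRange 0 (A.length : Int) 1).foldl (fun cnt k =>
        if PySem.Int.band (PySem.Int.band (PySem.List.pyGetD A i 0) (PySem.List.pyGetD A j 0)) (PySem.List.pyGetD A k 0) = 0
        then cnt + 1 else cnt) cnt) cnt) 0

-- ===== PORT B =====
def countTriplets_naive_alt (A : List Int) : Int :=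
  -- pair_count = {}; for x in A: for y in A: v = x & y; pair_count[v] = pair_count.get(v, 0) + 1
  let pc : PySem.Dict Int Int :=
    A.foldl (fun d x =>
      A.foldl (fun d y =>
        let v := PySem.Int.band x y
        d.insert v (d.getD v 0 + 1)) d) PySem.Dict.empty
  -- total = 0; for v, c in pair_count.items(): for z in A: if v & z == 0: total += c
  pc.items.foldl (fun tot vc =>
    A.foldl (fun tot z =>
      if PySem.Int.band vc.1 z = 0 then tot + vc.2 else tot) tot) 0

-- ===== PRECONDITION & SPEC =====
def Spec_countTriplets_naive (A : List Int) (out : Int) : Prop := out = countTriplets_naive_alt A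
instance (A : List Int) (out : Int) : Decidable (Spec_countTriplets_naive A out) := by unfold Spec_countTriplets_naive; infer_instance

-- ===== CLAIM (what is proved, stated in full; the proofs are below) =====
def Claim_equal_countTriplets_naive : Prop := ∀ (A : List Int), Dom_countTriplets_naive A → Spec_countTriplets_naive A (countTriplets_naive A)

-- ===== LEMMAS AND PROOFS =====

-- the list of all pairwise AND values, in the loops' traversal order
def pvPairAnds (A : List Int) : List Int := A.flatMap (fun x => A.map (fun y => PySem.Int.band x y))

-- f v = #{z in A | v & z = 0}, as an Int
def pvZeroCnt (A : List Int) (v : Int) : Int := (A.countP (fun z => decide (PySem.Int.band v z = 0)) : Int)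

theorem pv_sum_flatMap (l : List Int) (f : Int → List Int) :
    (l.flatMap f).sum = (l.map (fun x => (f x).sum)).sum := by
  induction l with
  | nil => simp
  | cons x xs ih => simp [List.flatMap_cons, List.sum_append, ih]

-- inner z-loop of B: `if v & z == 0: total += c`
theorem pv_foldl_ite_add_const (p : Int → Prop) [DecidablePred p] (l : List Int) (c : Int) :
    ∀ a : Int, l.foldl (fun acc z => if p z then acc + c else acc) a
      = a + c * ((l.countP (fun z => decide (p z)) : Int)) := by
  induction l with
  | nil => intro a; simp
  | cons x xs ih =>
    intro a
    by_cases hx : p x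
    · simp [hx, ih]; ring
    · simp [hx, ih]

-- A's value is the sum of pvZeroCnt over all pairwise ANDs
theorem pv_A_eq_sum (A : List Int) :
    countTriplets_naive A = ((pvPairAnds A).map (pvZeroCnt A)).sum := by
  unfold countTriplets_naive
  rw [PySem.List.foldl_pyRange_zero_pyGetD' A 0 (fun cnt x =>
    (PySem.List.pyRange 0 (A.length : Int) 1).foldl (fun cnt j =>
      (PySem.List.pyRange 0 (A.length : Int) 1).foldl (fun cnt k =>
        if PySem.Int.band (PySem.Int.band x (PySem.List.pyGetD A j 0)) (PySem.List.pyGetD A k 0) = 0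
        then cnt + 1 else cnt) cnt) cnt) 0]
  have hmid : (fun (cnt : Int) (x : Int) =>
      (PySem.List.pyRange 0 (A.length : Int) 1).foldl (fun cnt j =>
        (PySem.List.pyRange 0 (A.length : Int) 1).foldl (fun cnt k =>
          if PySem.Int.band (PySem.Int.band x (PySem.List.pyGetD A j 0)) (PySem.List.pyGetD A k 0) = 0
          then cnt + 1 else cnt) cnt) cnt)
      = fun (cnt : Int) (x : Int) => cnt + (A.map (fun y => pvZeroCnt A (PySem.Int.band x y))).sum := by
    funext cnt x
    rw [PySem.List.foldl_pyRange_zero_pyGetD' A 0 (fun cnt y =>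
      (PySem.List.pyRange 0 (A.length : Int) 1).foldl (fun cnt k =>
        if PySem.Int.band (PySem.Int.band x y) (PySem.List.pyGetD A k 0) = 0
        then cnt + 1 else cnt) cnt) cnt]
    have hin : (fun (cnt : Int) (y : Int) =>
        (PySem.List.pyRange 0 (A.length : Int) 1).foldl (fun cnt k =>
          if PySem.Int.band (PySem.Int.band x y) (PySem.List.pyGetD A k 0) = 0
          then cnt + 1 else cnt) cnt)
        = fun (cnt : Int) (y : Int) => cnt + pvZeroCnt A (PySem.Int.band x y) := by
      funext cnt y
      rw [PySem.List.foldl_pyRange_zero_pyGetD' A 0 (fun cnt z =>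
        if PySem.Int.band (PySem.Int.band x y) z = 0 then cnt + 1 else cnt) cnt,
        PySem.List.foldl_ite_add_one (fun z => PySem.Int.band (PySem.Int.band x y) z = 0)]
      rfl
    rw [hin, PySem.List.foldl_add A (fun y => pvZeroCnt A (PySem.Int.band x y)) cnt]
  rw [hmid, PySem.List.foldl_add A (fun x => (A.map (fun y => pvZeroCnt A (PySem.Int.band x y))).sum) 0]
  rw [pvPairAnds, List.map_flatMap,
    pv_sum_flatMap A (fun x => (A.map (fun y => PySem.Int.band x y)).map (pvZeroCnt A))]
  simp [List.map_map, Function.comp_def]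

-- B's value is the same sum grouped by distinct AND value with multiplicities
theorem pv_B_eq_sum (A : List Int) :
    countTriplets_naive_alt A
      = ((PySem.Set.ofList (pvPairAnds A)).map
          (fun v => (((pvPairAnds A).count v : Int)) * pvZeroCnt A v)).sum := by
  unfold countTriplets_naive_alt
  have hd : (A.foldl (fun d x =>
      A.foldl (fun d y =>
        d.insert (PySem.Int.band x y) ((d.getD (PySem.Int.band x y) 0) + 1)) d) PySem.Dict.empty)
      = PySem.Dict.counter (pvPairAnds A) := by
    rw [← PySem.Dict.foldl_insert_getD_add_one_eq_counter, pvPairAnds, List.foldl_flatMap]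
    simp [List.foldl_map]
  simp only [hd, PySem.Dict.items_counter]
  have hin : (fun (tot : Int) (vc : Int × Int) =>
      A.foldl (fun tot z => if PySem.Int.band vc.1 z = 0 then tot + vc.2 else tot) tot)
      = fun (tot : Int) (vc : Int × Int) => tot + vc.2 * pvZeroCnt A vc.1 := by
    funext tot vc
    rw [pv_foldl_ite_add_const (fun z => PySem.Int.band vc.1 z = 0) A vc.2 tot]
    rfl
  rw [hin, List.foldl_map, PySem.List.foldl_add _ (fun k => ((pvPairAnds A).count k : Int) * pvZeroCnt A k) 0]
  simp

-- grouping: a sum over a list equals the multiplicity-weighted sum over its distinct values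
theorem pv_group_sum (L S : List Int) (hS : S.Nodup) (hmem : ∀ k, k ∈ S ↔ k ∈ L)
    (f : Int → Int) :
    (L.map f).sum = (S.map (fun v => ((L.count v : Int)) * f v)).sum := by
  have hST : S.toFinset = L.toFinset := by
    ext a; simp [List.mem_toFinset, hmem]
  rw [Finset.sum_list_map_count, ← List.sum_toFinset _ hS, hST]
  apply Finset.sum_congr rfl
  intro m _
  simp

-- ===== VERDICT (by name: the statement is the Claim_ definition above) =====
theorem countTriplets_naive_spec : Claim_equal_countTriplets_naive := by
  intro A _
  unfold Spec_countTriplets_naive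
  rw [pv_A_eq_sum, pv_B_eq_sum]
  exact pv_group_sum _ _ (PySem.Set.nodup_ofList _) (PySem.Set.mem_ofList _) _
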